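-- pv_equiv track=rewrite | github.com/fyk943749465/LLeetCode | leetcode1400/leetcode1385.py | findTheDistanceValue2
-- ===== SOURCE A (Python) =====
-- from typing import List
--
-- def findTheDistanceValue2(arr1: List[int], arr2: List[int], d: int) -> int:
--     arr1.sort()
--     arr2.sort()
--     ans = j = 0
--     for x in arr1:
--         while j < len(arr2) and arr2[j] < x - d:
--             j += 1
--         if j == len(arr2) or arr2[j] > x + d:
--             ans += 1
--     return ans
-- ===== SOURCE B (Python) =====
-- from typing import List
--
-- def findTheDistanceValue2(arr1: List[int], arr2: List[int], d: int) -> int: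
--     return sum(1 for x in arr1 if all(abs(x - y) > d for y in arr2))
-- ===== Notes on version B (the rewrite author's own statement) =====
-- stated objective: idiomatic
-- what changed: Replaced the sort-both + single two-pointer merge sweep (with a persistent index j into arr2) by the direct one-liner that counts arr1 elements all of whose distances to arr2 exceed d; B does not sort and does not mutate its arguments (return value is unchanged).
import Mathlib
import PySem

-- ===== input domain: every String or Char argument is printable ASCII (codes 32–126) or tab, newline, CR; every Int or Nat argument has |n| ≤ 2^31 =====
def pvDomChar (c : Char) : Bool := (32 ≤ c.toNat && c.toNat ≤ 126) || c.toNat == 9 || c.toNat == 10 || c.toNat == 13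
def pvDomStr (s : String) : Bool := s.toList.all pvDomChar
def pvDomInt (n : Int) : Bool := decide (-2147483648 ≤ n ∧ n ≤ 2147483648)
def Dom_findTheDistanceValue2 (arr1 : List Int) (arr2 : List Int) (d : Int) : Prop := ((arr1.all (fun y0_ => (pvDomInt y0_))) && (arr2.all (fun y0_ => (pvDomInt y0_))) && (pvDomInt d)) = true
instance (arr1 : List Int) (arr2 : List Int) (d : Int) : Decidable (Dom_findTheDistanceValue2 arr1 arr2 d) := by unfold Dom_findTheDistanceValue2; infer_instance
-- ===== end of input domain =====

-- B replaces A's sort-both + two-pointer sweep with a direct count over arr1 of elements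
-- all of whose distances to arr2 exceed d (idiomatic one-liner); equivalence is about the
-- RETURN value only: A sorts both argument lists in place, B does not mutate them.

-- ===== PORT A =====
-- the `while j < len(arr2) and arr2[j] < x - d: j += 1` loop
def pvWhileA (s2 : List Int) (x d : Int) (j : Nat) : Nat :=
  if h : j < s2.length ∧ s2.getD j 0 < x - d then pvWhileA s2 x d (j + 1) else j
termination_by s2.length - j
decreasing_by omega

-- the `for x in arr1` loop carrying (ans, j)
def pvLoopA (s2 : List Int) (d : Int) : List Int → Int → Nat → Int
  | [], ans, _ => ans
  | x :: rest, ans, j =>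
    let j' := pvWhileA s2 x d j
    pvLoopA s2 d rest (if j' = s2.length ∨ x + d < s2.getD j' 0 then ans + 1 else ans) j'

def findTheDistanceValue2 (arr1 : List Int) (arr2 : List Int) (d : Int) : Int :=
  pvLoopA (PySem.List.sorted arr2 (fun y => y) false) d
    (PySem.List.sorted arr1 (fun y => y) false) 0 0

-- ===== PORT B =====
def findTheDistanceValue2_alt (arr1 : List Int) (arr2 : List Int) (d : Int) : Int :=
  ((arr1.countP (fun x => arr2.all (fun y => decide (d < |x - y|)))) : Int)

-- ===== PRECONDITION & SPEC =====
def Spec_findTheDistanceValue2 (arr1 : List Int) (arr2 : List Int) (d : Int) (out : Int) : Prop := out = findTheDistanceValue2_alt arr1 arr2 d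
instance (arr1 : List Int) (arr2 : List Int) (d : Int) (out : Int) : Decidable (Spec_findTheDistanceValue2 arr1 arr2 d out) := by unfold Spec_findTheDistanceValue2; infer_instance

-- ===== CLAIM (what is proved, stated in full; the proofs are below) =====
def Claim_equal_findTheDistanceValue2 : Prop := ∀ (arr1 : List Int) (arr2 : List Int) (d : Int), Dom_findTheDistanceValue2 arr1 arr2 d → Spec_findTheDistanceValue2 arr1 arr2 d (findTheDistanceValue2 arr1 arr2 d)

-- ===== LEMMAS AND PROOFS =====

-- specification of the inner while loop
theorem pvWhileA_spec (s2 : List Int) (x d : Int) :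
    ∀ (n j : Nat), s2.length - j ≤ n → j ≤ s2.length →
      (∀ k, k < j → s2.getD k 0 < x - d) →
      j ≤ pvWhileA s2 x d j ∧ pvWhileA s2 x d j ≤ s2.length ∧
      (∀ k, k < pvWhileA s2 x d j → s2.getD k 0 < x - d) ∧
      (pvWhileA s2 x d j = s2.length ∨ ¬ s2.getD (pvWhileA s2 x d j) 0 < x - d) := by
  intro n
  induction n with
  | zero =>
    intro j hn hj H
    have hj' : j = s2.length := by omega
    rw [pvWhileA]
    simp only [hj']
    simp_all
  | succ n ih =>
    intro j hn hj H
    rw [pvWhileA]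
    by_cases h : j < s2.length ∧ s2.getD j 0 < x - d
    · simp only [dif_pos h]
      have H' : ∀ k, k < j + 1 → s2.getD k 0 < x - d := by
        intro k hk
        rcases Nat.lt_succ_iff_lt_or_eq.mp hk with hk' | hk'
        · exact H k hk'
        · subst hk'; exact h.2
      have := ih (j + 1) (by omega) (by omega) H'
      exact ⟨by omega, this.2.1, this.2.2.1, this.2.2.2⟩
    · simp only [dif_neg h]
      refine ⟨le_refl _, hj, H, ?_⟩
      by_cases hl : j = s2.length
      · exact Or.inl hl
      · right; intro hlt; exact h ⟨by omega, hlt⟩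

-- main loop invariant: on sorted s1 (s2 sorted via getD-monotonicity), the loop counts
theorem pvLoopA_eq (s2 : List Int) (d : Int)
    (hmono : ∀ p q : Nat, p ≤ q → q < s2.length → s2.getD p 0 ≤ s2.getD q 0) :
    ∀ (s1 : List Int) (ans : Int) (j : Nat),
      s1.Pairwise (· ≤ ·) → j ≤ s2.length →
      (∀ k, k < j → ∀ x ∈ s1, s2.getD k 0 < x - d) →
      pvLoopA s2 d s1 ans j
        = ans + (s1.countP (fun x => s2.all (fun y => decide (d < |x - y|))) : Int) := by
  intro s1
  induction s1 with
  | nil => intro ans j _ _ _; simp [pvLoopA]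
  | cons x rest ih =>
    intro ans j hpw hj H
    rw [List.pairwise_cons] at hpw
    have Hx : ∀ k, k < j → s2.getD k 0 < x - d := fun k hk => H k hk x (by simp)
    obtain ⟨h1, h2, h3, h4⟩ := pvWhileA_spec s2 x d (s2.length - j) j (le_refl _) hj Hx
    set j' := pvWhileA s2 x d j with hj'def
    -- the per-element test agrees with the brute-force predicate
    have hgood : (j' = s2.length ∨ x + d < s2.getD j' 0)
        ↔ (s2.all (fun y => decide (d < |x - y|)) = true) := by
      constructor
      · intro hc
        rw [List.all_eq_true]
        intro y hy
        obtain ⟨k, hk, hky⟩ := List.mem_iff_getElem.mp hy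
        have hgd : s2.getD k 0 = y := by
          rw [List.getD_eq_getElem?_getD, List.getElem?_eq_getElem hk, hky]; rfl
        simp only [decide_eq_true_eq]
        rcases hc with hc | hc
        · have hlt : s2.getD k 0 < x - d := h3 k (by omega)
          rw [hgd] at hlt
          calc d < x - y := by omega
            _ ≤ |x - y| := le_abs_self _
        · by_cases hkj : k < j'
          · have hlt : s2.getD k 0 < x - d := h3 k hkj
            rw [hgd] at hlt
            calc d < x - y := by omega
              _ ≤ |x - y| := le_abs_self _
          · have hle : s2.getD j' 0 ≤ s2.getD k 0 := hmono j' k (by omega) hk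
            rw [hgd] at hle
            calc d < y - x := by omega
              _ ≤ |y - x| := le_abs_self _
              _ = |x - y| := abs_sub_comm _ _
      · intro hall
        by_contra hc
        rw [not_or, not_lt] at hc
        obtain ⟨hne, hle⟩ := hc
        have hjlt : j' < s2.length := by omega
        have hy : s2.getD j' 0 ∈ s2 := by
          rw [List.getD_eq_getElem?_getD, List.getElem?_eq_getElem hjlt]
          exact List.getElem_mem hjlt
        have habs := List.all_eq_true.mp hall _ hy
        simp only [decide_eq_true_eq] at habs
        have hge : ¬ s2.getD j' 0 < x - d := by
          rcases h4 with h | h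
          · exact absurd h hne
          · exact h
        have : |x - s2.getD j' 0| ≤ d := abs_le.mpr ⟨by omega, by omega⟩
        omega
    have Hrest : ∀ k, k < j' → ∀ x' ∈ rest, s2.getD k 0 < x' - d := by
      intro k hk x' hx'
      have := h3 k hk
      have := hpw.1 x' hx'
      omega
    rw [pvLoopA]
    rw [ih _ j' hpw.2 h2 Hrest]
    rw [List.countP_cons]
    by_cases hc : j' = s2.length ∨ x + d < s2.getD j' 0
    · rw [if_pos hc]
      rw [if_pos (hgood.mp hc)]
      push_cast
      ring
    · rw [if_neg hc]
      rw [if_neg (fun h => hc (hgood.mpr h))]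
      push_cast
      ring
-- ===== VERDICT (by name: the statement is the Claim_ definition above) =====
theorem findTheDistanceValue2_spec : Claim_equal_findTheDistanceValue2 := by
  intro arr1 arr2 d _
  unfold Spec_findTheDistanceValue2 findTheDistanceValue2 findTheDistanceValue2_alt
  set s2 := PySem.List.sorted arr2 (fun y => y) false with hs2
  set s1 := PySem.List.sorted arr1 (fun y => y) false with hs1
  have hmono : ∀ p q : Nat, p ≤ q → q < s2.length → s2.getD p 0 ≤ s2.getD q 0 := by
    intro p q hpq hq
    have hp : p < s2.length := by omega
    rw [List.getD_eq_getElem?_getD, List.getElem?_eq_getElem hp,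
        List.getD_eq_getElem?_getD, List.getElem?_eq_getElem hq]
    simpa using PySem.List.sorted_id_getElem_mono (xs := arr2) hpq hq
  have hpw : s1.Pairwise (· ≤ ·) := by
    simpa using PySem.List.sorted_pairwise (xs := arr1) (key := fun y => y)
  rw [pvLoopA_eq s2 d hmono s1 0 0 hpw (Nat.zero_le _) (by intro k hk; omega)]
  have hp1 : (PySem.List.sorted arr1 (fun y => y) false).Perm arr1 :=
    PySem.List.sorted_perm arr1 (fun y => y) false
  have hp2 : (PySem.List.sorted arr2 (fun y => y) false).Perm arr2 :=
    PySem.List.sorted_perm arr2 (fun y => y) false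
  rw [hp1.countP_eq]
  have hall : ∀ x : Int, s2.all (fun y => decide (d < |x - y|)) = arr2.all (fun y => decide (d < |x - y|)) := by
    intro x
    rw [Bool.eq_iff_iff]
    simp only [List.all_eq_true]
    constructor
    · intro h y hy; exact h y (hp2.mem_iff.mpr hy)
    · intro h y hy; exact h y (hp2.mem_iff.mp hy)
  rw [show (fun x => s2.all fun y => decide (d < |x - y|)) = (fun x => arr2.all fun y => decide (d < |x - y|)) from funext hall]
  ring
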